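-- pv_equiv track=rewrite | github.com/el2727/Morphological-error-analysis | data_extraction_morphological_analysis.py | get_indexed_results
-- ===== SOURCE A (Python) =====
-- def get_indexed_results(error_list, zipped_hypo, zipped_lemmas, zipped_gold, zipped_tags):
--     results_list = []
--     for i in error_list:
--         for w in zipped_hypo:
--             for y, x in [w]:
--                 if i == x:
--                     results_list.append(w)
--
--     lemmas_results_list = []
--     gold_results_list = []
--     tags_results_list = []
--
--     for i in results_list:
--         for y in zipped_lemmas:
--             if i[0] == y[0]:
--                 lemmas_results_list.append(y[1])
--
--     for i in results_list:
--         for y in zipped_gold: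
--             if i[0] == y[0]:
--                 gold_results_list.append(y[1])
--
--     for i in results_list:
--         for y in zipped_tags:
--             if i[0] == y[0]:
--                 tags_results_list.append(y[1])
--
--     # Zip together aligned lemmas, gold, hypo and target tags into a list
--
--     lemma_gold_hypo_tags_list = list(zip(lemmas_results_list, gold_results_list, error_list, tags_results_list))
--     return lemma_gold_hypo_tags_list
-- ===== SOURCE B (Python) =====
-- def get_indexed_results(error_list, zipped_hypo, zipped_lemmas, zipped_gold, zipped_tags):
--     hypo_by_word = {}
--     for p in zipped_hypo:
--         hypo_by_word.setdefault(p[1], []).append(p)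
--     lem_by_idx = {}
--     for k, v in zipped_lemmas:
--         lem_by_idx.setdefault(k, []).append(v)
--     gold_by_idx = {}
--     for k, v in zipped_gold:
--         gold_by_idx.setdefault(k, []).append(v)
--     tag_by_idx = {}
--     for k, v in zipped_tags:
--         tag_by_idx.setdefault(k, []).append(v)
--     results = [p for w in error_list for p in hypo_by_word.get(w, [])]
--     lemmas = [v for p in results for v in lem_by_idx.get(p[0], [])]
--     gold = [v for p in results for v in gold_by_idx.get(p[0], [])]
--     tags = [v for p in results for v in tag_by_idx.get(p[0], [])]
--     return list(zip(lemmas, gold, error_list, tags))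
-- ===== Notes on version B (the rewrite author's own statement) =====
-- stated objective: faster
-- what changed: Replaces A's nested scans (every error word scans all of zipped_hypo, and every matched pair scans all of zipped_lemmas/gold/tags) by hash indexes built once (key -> ordered list of values) followed by single-pass lookups.
import Mathlib
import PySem

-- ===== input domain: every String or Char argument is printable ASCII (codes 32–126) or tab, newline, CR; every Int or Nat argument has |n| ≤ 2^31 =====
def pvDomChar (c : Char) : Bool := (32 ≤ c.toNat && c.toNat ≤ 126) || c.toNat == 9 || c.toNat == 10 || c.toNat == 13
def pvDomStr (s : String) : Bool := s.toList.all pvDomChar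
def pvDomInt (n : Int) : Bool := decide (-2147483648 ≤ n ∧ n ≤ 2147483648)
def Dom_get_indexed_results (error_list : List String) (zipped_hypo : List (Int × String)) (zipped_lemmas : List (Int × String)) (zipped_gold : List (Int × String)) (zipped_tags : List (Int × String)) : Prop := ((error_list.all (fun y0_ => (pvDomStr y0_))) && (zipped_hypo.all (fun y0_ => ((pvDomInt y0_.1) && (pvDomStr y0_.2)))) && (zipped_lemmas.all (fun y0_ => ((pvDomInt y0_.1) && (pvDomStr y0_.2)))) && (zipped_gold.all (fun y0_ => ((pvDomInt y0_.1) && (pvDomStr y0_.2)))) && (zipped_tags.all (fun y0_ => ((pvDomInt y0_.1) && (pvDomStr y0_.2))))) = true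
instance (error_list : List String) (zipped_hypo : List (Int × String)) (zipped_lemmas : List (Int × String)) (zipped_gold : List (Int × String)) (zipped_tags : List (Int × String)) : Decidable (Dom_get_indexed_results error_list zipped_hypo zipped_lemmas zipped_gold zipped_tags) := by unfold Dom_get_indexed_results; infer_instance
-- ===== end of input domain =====

-- ===== PORT A =====
-- B replaces A's nested scans by hash indexes built once, then single-pass lookups (return value identical).
def get_indexed_results (error_list : List String) (zipped_hypo : List (Int × String)) (zipped_lemmas : List (Int × String)) (zipped_gold : List (Int × String)) (zipped_tags : List (Int × String)) : List (String × String × String × String) :=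
  let results_list := error_list.foldl (fun acc i =>
    zipped_hypo.foldl (fun acc2 w => if i == w.2 then acc2 ++ [w] else acc2) acc) []
  let lemmas_results_list := results_list.foldl (fun acc i =>
    zipped_lemmas.foldl (fun a y => if i.1 == y.1 then a ++ [y.2] else a) acc) []
  let gold_results_list := results_list.foldl (fun acc i =>
    zipped_gold.foldl (fun a y => if i.1 == y.1 then a ++ [y.2] else a) acc) []
  let tags_results_list := results_list.foldl (fun acc i =>
    zipped_tags.foldl (fun a y => if i.1 == y.1 then a ++ [y.2] else a) acc) []
  lemmas_results_list.zip (gold_results_list.zip (error_list.zip tags_results_list))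

-- ===== PORT B =====
def get_indexed_results_alt (error_list : List String) (zipped_hypo : List (Int × String)) (zipped_lemmas : List (Int × String)) (zipped_gold : List (Int × String)) (zipped_tags : List (Int × String)) : List (String × String × String × String) :=
  let hypo_by_word := zipped_hypo.foldl (fun d p => d.modify p.2 [] (· ++ [p])) PySem.Dict.empty
  let lem_by_idx := zipped_lemmas.foldl (fun d q => d.modify q.1 [] (· ++ [q.2])) PySem.Dict.empty
  let gold_by_idx := zipped_gold.foldl (fun d q => d.modify q.1 [] (· ++ [q.2])) PySem.Dict.empty
  let tag_by_idx := zipped_tags.foldl (fun d q => d.modify q.1 [] (· ++ [q.2])) PySem.Dict.empty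
  let results := error_list.flatMap (fun w => hypo_by_word.getD w [])
  let lemmas := results.flatMap (fun p => lem_by_idx.getD p.1 [])
  let gold := results.flatMap (fun p => gold_by_idx.getD p.1 [])
  let tags := results.flatMap (fun p => tag_by_idx.getD p.1 [])
  lemmas.zip (gold.zip (error_list.zip tags))

-- ===== PRECONDITION & SPEC =====
def Spec_get_indexed_results (error_list : List String) (zipped_hypo : List (Int × String)) (zipped_lemmas : List (Int × String)) (zipped_gold : List (Int × String)) (zipped_tags : List (Int × String)) (out : List (String × String × String × String)) : Prop := out = get_indexed_results_alt error_list zipped_hypo zipped_lemmas zipped_gold zipped_tags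
instance (error_list : List String) (zipped_hypo : List (Int × String)) (zipped_lemmas : List (Int × String)) (zipped_gold : List (Int × String)) (zipped_tags : List (Int × String)) (out : List (String × String × String × String)) : Decidable (Spec_get_indexed_results error_list zipped_hypo zipped_lemmas zipped_gold zipped_tags out) := by unfold Spec_get_indexed_results; infer_instance

-- ===== CLAIM (what is proved, stated in full; the proofs are below) =====
def Claim_equal_get_indexed_results : Prop := ∀ (error_list : List String) (zipped_hypo : List (Int × String)) (zipped_lemmas : List (Int × String)) (zipped_gold : List (Int × String)) (zipped_tags : List (Int × String)), Dom_get_indexed_results error_list zipped_hypo zipped_lemmas zipped_gold zipped_tags → Spec_get_indexed_results error_list zipped_hypo zipped_lemmas zipped_gold zipped_tags (get_indexed_results error_list zipped_hypo zipped_lemmas zipped_gold zipped_tags)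

-- ===== LEMMAS AND PROOFS =====

-- ===== VERDICT (by name: the statement is the Claim_ definition above) =====
theorem pv_beq_symm {a : Type} [BEq a] [LawfulBEq a] (x y : a) : (x == y) = (y == x) := by
  simp [eq_comm]

-- grouping by the pair itself, keyed on the second component
theorem getD_group_pairs (l : List (Int × String)) (d : PySem.Dict String (List (Int × String))) (c : String) :
    (l.foldl (fun d p => d.modify p.2 [] (· ++ [p])) d).getD c []
      = d.getD c [] ++ l.filter (fun p => p.2 == c) := by
  have h := PySem.Dict.getD_foldl_modify_append (l := l.map (fun p => (p.2, p))) (d := d) (c := c)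
  rw [List.foldl_map] at h
  simpa [List.filter_map, List.map_map, Function.comp_def] using h

theorem get_indexed_results_spec : Claim_equal_get_indexed_results := by
  intro error_list zipped_hypo zipped_lemmas zipped_gold zipped_tags _hdom
  unfold Spec_get_indexed_results get_indexed_results get_indexed_results_alt
  simp only [PySem.List.foldl_append_if_eq_filter, PySem.List.foldl_append_if,
    PySem.List.foldl_append_eq_flatMap, List.nil_append,
    getD_group_pairs, PySem.Dict.getD_foldl_modify_append, PySem.Dict.getD_empty]
  have hres : (fun i => List.filter (fun w => i == w.2) zipped_hypo)
      = (fun w => List.filter (fun p => p.2 == w) zipped_hypo) := by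
    funext i; congr 1; funext w; exact pv_beq_symm ..
  rw [hres]
  have hv : ∀ (zl : List (Int × String)) (i : Int × String),
      (List.filter (fun y => i.1 == y.1) zl).map (·.2)
        = (List.filter (fun q => q.1 == i.1) zl).map (·.2) := by
    intro zl i; congr 1; congr 1; funext y; exact pv_beq_symm ..
  simp only [hv]
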